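-- pv_equiv track=rewrite | github.com/kuba1302/advent-of-code-2023 | solutions/day_3/solution.py | find_numbers_positions
-- ===== SOURCE A (Python) =====
-- def find_numbers_positions(array: list[list[str]]) -> list[tuple[int, int]]:
--     numbers_positions = []
--
--     for idx_row, row in enumerate(array):
--         current_numbers = []
--         was_previous_number = False
--         for idx_col, col in enumerate(row):
--             if col.isnumeric():
--                 if not was_previous_number:
--                     current_numbers = []
--
--                 current_numbers.append((idx_row, idx_col))
--
--                 was_previous_number = True
--             else:
--                 if current_numbers:
--                     numbers_positions.append(current_numbers)
--                     current_numbers = []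
--
--                 was_previous_number = False
--
--         if current_numbers:
--             numbers_positions.append(current_numbers)
--
--     return numbers_positions
-- ===== SOURCE B (Python) =====
-- def find_numbers_positions(array: list[list[str]]) -> list[tuple[int, int]]:
--     # Run-scanning: for each row, jump over each maximal run of numeric cells
--     # and emit its positions in one comprehension (no flag / flush state machine).
--     result = []
--     for idx_row, row in enumerate(array):
--         idx_col = 0
--         n = len(row)
--         while idx_col < n:
--             if row[idx_col].isnumeric():
--                 start = idx_col
--                 while idx_col < n and row[idx_col].isnumeric():
--                     idx_col += 1
--                 result.append([(idx_row, j) for j in range(start, idx_col)])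
--             else:
--                 idx_col += 1
--     return result
-- ===== Notes on version B (the rewrite author's own statement) =====
-- stated objective: simpler
-- what changed: Replaced A's flag-based state machine (was_previous_number / current_numbers flush logic) with a direct run-scan that jumps over each maximal digit run and emits its positions in one comprehension.
import Mathlib
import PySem

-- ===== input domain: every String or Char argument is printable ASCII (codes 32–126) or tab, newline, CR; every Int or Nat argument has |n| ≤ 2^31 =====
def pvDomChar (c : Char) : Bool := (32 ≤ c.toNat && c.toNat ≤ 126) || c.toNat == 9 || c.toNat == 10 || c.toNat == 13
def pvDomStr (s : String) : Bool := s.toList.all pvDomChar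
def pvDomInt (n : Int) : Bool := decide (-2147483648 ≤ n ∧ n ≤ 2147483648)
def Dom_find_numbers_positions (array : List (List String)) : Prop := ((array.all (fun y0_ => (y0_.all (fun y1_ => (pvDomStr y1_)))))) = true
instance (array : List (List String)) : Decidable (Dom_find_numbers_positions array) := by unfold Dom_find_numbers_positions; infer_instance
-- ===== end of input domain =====

-- B changes A's flag-based state machine into a direct run-scan over maximal digit runs (objective: simpler).

-- str.isnumeric(): on the printable-ASCII domain (Dom) it coincides with str.isdigit,
-- which PySem.Str.strIsdigit models exactly; both ports use this predicate.
def pyIsnumeric (s : String) : Bool := PySem.Str.strIsdigit s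

-- ===== PORT A =====
-- inner 'for idx_col, col in enumerate(row)' loop, carrying (numbers_positions, current_numbers, was_previous_number)
def aRowLoop (idx_row idx_col : Nat) (numbers_positions : List (List (Int × Int)))
    (current : List (Int × Int)) (wasPrev : Bool) :
    List String → List (List (Int × Int)) × List (Int × Int) × Bool
  | [] => (numbers_positions, current, wasPrev)
  | col :: rest =>
    if pyIsnumeric col then
      let current := if !wasPrev then [] else current
      aRowLoop idx_row (idx_col + 1) numbers_positions
        (current ++ [((idx_row : Int), (idx_col : Int))]) true rest
    else
      if current ≠ [] then
        aRowLoop idx_row (idx_col + 1) (numbers_positions ++ [current]) [] false rest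
      else
        aRowLoop idx_row (idx_col + 1) numbers_positions current false rest

-- outer 'for idx_row, row in enumerate(array)' loop
def aOuter (idx_row : Nat) (numbers_positions : List (List (Int × Int))) :
    List (List String) → List (List (Int × Int))
  | [] => numbers_positions
  | row :: rest =>
    let st := aRowLoop idx_row 0 numbers_positions [] false row
    aOuter (idx_row + 1) (if st.2.1 ≠ [] then st.1 ++ [st.2.1] else st.1) rest

def find_numbers_positions (array : List (List String)) : List (List (Int × Int)) :=
  aOuter 0 [] array

-- ===== PORT B =====
-- inner 'while idx_col < n' run-scan of Source B: on a digit, consume the whole maximal run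
-- (the inner while = takeWhile/dropWhile) and emit its positions in one comprehension
def bRow (r c : Nat) : List String → List (List (Int × Int))
  | [] => []
  | x :: xs =>
    if pyIsnumeric x then
      let run := xs.takeWhile pyIsnumeric
      ((List.range (run.length + 1)).map (fun j => ((r : Int), ((c + j : Nat) : Int))))
        :: bRow r (c + run.length + 1) (xs.dropWhile pyIsnumeric)
    else
      bRow r (c + 1) xs
  termination_by xs => xs.length
  decreasing_by
  · simpa using Nat.lt_succ_of_le (List.length_dropWhile_le ..)
  · simp

def bOuter (r : Nat) : List (List String) → List (List (Int × Int))
  | [] => []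
  | row :: rest => bRow r 0 row ++ bOuter (r + 1) rest

def find_numbers_positions_alt (array : List (List String)) : List (List (Int × Int)) :=
  bOuter 0 array

-- ===== PRECONDITION & SPEC =====
def Spec_find_numbers_positions (array : List (List String)) (out : List (List (Int × Int))) : Prop := out = find_numbers_positions_alt array
instance (array : List (List String)) (out : List (List (Int × Int))) : Decidable (Spec_find_numbers_positions array out) := by unfold Spec_find_numbers_positions; infer_instance

-- ===== CLAIM (what is proved, stated in full; the proofs are below) =====
def Claim_equal_find_numbers_positions : Prop := ∀ (array : List (List String)), Dom_find_numbers_positions array → Spec_find_numbers_positions array (find_numbers_positions array)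

-- ===== LEMMAS AND PROOFS =====

-- A's end-of-row flush applied to the inner-loop state
def finishRow (st : List (List (Int × Int)) × List (Int × Int) × Bool) : List (List (Int × Int)) :=
  if st.2.1 ≠ [] then st.1 ++ [st.2.1] else st.1

-- Mutual invariant of A's state machine vs B's run-scan, by strong induction on the suffix length:
-- idle state (current = [], flag false) produces acc ++ bRow; run state (flag true, current ≠ [])
-- first extends current with the rest of the current maximal run, then continues idle.
-- a digit run starting at c, as B emits it, split into its head position and the shifted tail
lemma run_shift (r c L : Nat) :
    (List.range (L + 1)).map (fun j => ((r : Int), ((c + j : Nat) : Int))) =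
      ((r : Int), (c : Int)) :: (List.range L).map (fun j => ((r : Int), ((c + 1 + j : Nat) : Int))) := by
  rw [List.range_succ_eq_map]
  simp only [List.map_cons, List.map_map, Nat.add_zero]
  congr 1
  refine List.map_congr_left fun j _ => ?_
  simp only [Function.comp_apply, Prod.mk.injEq, true_and]
  push_cast; omega

lemma key : ∀ (n : Nat) (xs : List String), xs.length ≤ n → ∀ (r c : Nat) (acc : List (List (Int × Int))),
    (finishRow (aRowLoop r c acc [] false xs) = acc ++ bRow r c xs)
    ∧ (∀ cur : List (Int × Int), cur ≠ [] →
        finishRow (aRowLoop r c acc cur true xs) =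
          acc ++ (cur ++ (List.range (xs.takeWhile pyIsnumeric).length).map
              (fun j => ((r : Int), ((c + j : Nat) : Int))))
            :: bRow r (c + (xs.takeWhile pyIsnumeric).length) (xs.dropWhile pyIsnumeric)) := by
  intro n
  induction n with
  | zero =>
    intro xs hxs r c acc
    have : xs = [] := List.length_eq_zero_iff.mp (Nat.le_zero.mp hxs)
    subst this
    refine ⟨by simp [aRowLoop, bRow, finishRow], fun cur hcur => by simp [aRowLoop, bRow, finishRow, hcur]⟩
  | succ n ih =>
    intro xs hxs r c acc
    match xs with
    | [] =>
      refine ⟨by simp [aRowLoop, bRow, finishRow], fun cur hcur => by simp [aRowLoop, bRow, finishRow, hcur]⟩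
    | x :: xs' =>
      have hlen : xs'.length ≤ n := by
        have := hxs; simp only [List.length_cons] at this; omega
      by_cases hx : pyIsnumeric x
      · constructor
        · -- idle, digit: enter run state with current = [(r, c)]
          have hrun := (ih xs' hlen r (c + 1) acc).2 [((r : Int), (c : Int))] (by simp)
          simp only [aRowLoop, hx, if_pos, ite_self, List.nil_append]
          rw [hrun]
          simp only [bRow, hx, if_pos, run_shift]
          rw [show c + (List.takeWhile pyIsnumeric xs').length + 1
                = c + 1 + (List.takeWhile pyIsnumeric xs').length by omega]
          simp
        · -- run state, digit: extend current
          intro cur hcur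
          have hrun := (ih xs' hlen r (c + 1) acc).2 (cur ++ [((r : Int), (c : Int))]) (by simp)
          simp only [aRowLoop, hx, if_pos]
          rw [show (if (!true) = true then ([] : List (Int × Int)) else cur) = cur from by simp]
          rw [hrun]
          simp only [List.takeWhile_cons, List.dropWhile_cons, hx, if_pos, List.length_cons,
            run_shift]
          rw [show c + ((List.takeWhile pyIsnumeric xs').length + 1)
                = c + 1 + (List.takeWhile pyIsnumeric xs').length by omega]
          simp
      · have hx' : pyIsnumeric x = false := by simpa using hx
        constructor
        · -- idle, non-digit: stay idle
          have hidle := (ih xs' hlen r (c + 1) acc).1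
          simp only [aRowLoop, hx', Bool.false_eq_true, if_neg, ne_eq, not_true_eq_false,
            not_false_eq_true, ite_self, bRow]
          simpa using hidle
        · -- run state, non-digit: flush current, back to idle
          intro cur hcur
          have hidle := (ih xs' hlen r (c + 1) (acc ++ [cur])).1
          simp only [aRowLoop, hx', Bool.false_eq_true, if_neg, ne_eq, hcur,
            not_false_eq_true, if_pos, List.takeWhile_cons, List.dropWhile_cons,
            not_false_eq_true]
          rw [hidle]
          simp [bRow, hx']

lemma rowLemma (r c : Nat) (acc : List (List (Int × Int))) (xs : List String) :
    finishRow (aRowLoop r c acc [] false xs) = acc ++ bRow r c xs :=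
  (key xs.length xs le_rfl r c acc).1

lemma outerLemma : ∀ (rows : List (List String)) (r : Nat) (acc : List (List (Int × Int))),
    aOuter r acc rows = acc ++ bOuter r rows := by
  intro rows
  induction rows with
  | nil => intro r acc; simp [aOuter, bOuter]
  | cons row rest ih =>
    intro r acc
    show aOuter (r + 1) (finishRow (aRowLoop r 0 acc [] false row)) rest = _
    rw [rowLemma, ih]
    simp [bOuter]

-- ===== VERDICT (by name: the statement is the Claim_ definition above) =====
theorem find_numbers_positions_spec : Claim_equal_find_numbers_positions := by
  intro array _
  show find_numbers_positions array = find_numbers_positions_alt array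
  unfold find_numbers_positions find_numbers_positions_alt
  simpa using outerLemma array 0 []
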